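-- pv_equiv track=rewrite | github.com/cissna/ranker | rankThingsByIndividualComparisons/fjmi.py | build_jacob_insertion_sequence
-- ===== SOURCE A (Python) =====
-- def jacobsthal(n):
--     if n == 0:
--         return 0
--     if n == 1:
--         return 1
--     return jacobsthal(n - 1) + 2 * jacobsthal(n - 2)
--
-- def build_jacob_insertion_sequence(array):
--     array_len = len(array)
--     sequence = []
--     j = 3  # first index that matters
--     while jacobsthal(j) < array_len - 1:
--         sequence.append(jacobsthal(j))
--         j += 1
--     return sequence
-- ===== SOURCE B (Python) =====
-- def build_jacob_insertion_sequence(array):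
--     # Iteratively generates Jacobsthal numbers with two running values
--     # instead of recomputing them by naive (exponential) recursion.
--     limit = len(array) - 1
--     sequence = []
--     a, b = 1, 1  # J(1), J(2)
--     while True:
--         c = b + 2 * a  # next Jacobsthal number, starting at J(3)
--         if c >= limit:
--             return sequence
--         sequence.append(c)
--         a, b = b, c
-- ===== Notes on version B (the rewrite author's own statement) =====
-- stated objective: faster
-- what changed: Replaces the per-iteration naive exponential recursion jacobsthal(j) by an iterative generator carrying the last two Jacobsthal numbers as running state.
import Mathlib
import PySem

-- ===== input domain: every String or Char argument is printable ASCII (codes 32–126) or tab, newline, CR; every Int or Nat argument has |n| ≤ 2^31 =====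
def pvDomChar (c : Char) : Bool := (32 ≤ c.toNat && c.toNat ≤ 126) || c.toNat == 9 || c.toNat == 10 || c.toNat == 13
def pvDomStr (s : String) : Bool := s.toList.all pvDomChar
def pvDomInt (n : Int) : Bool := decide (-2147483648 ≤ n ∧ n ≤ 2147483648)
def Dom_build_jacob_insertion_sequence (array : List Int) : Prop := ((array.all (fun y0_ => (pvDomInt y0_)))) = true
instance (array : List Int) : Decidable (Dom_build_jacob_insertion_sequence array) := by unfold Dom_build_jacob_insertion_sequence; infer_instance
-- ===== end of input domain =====

-- B replaces A's per-iteration naive exponential Jacobsthal recursion by an iterative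
-- generator carrying the last two Jacobsthal numbers (faster, asymptotically).
-- Both loop ports use the structural fuel `array.length`, which is sufficient:
-- the Python loops stop at the first j with jacobsthal(j) ≥ len-1, and
-- jacobsthal(j) ≥ j - 1, so at most len - 3 iterations ever run.

-- ===== PORT A =====
-- A's recursive jacobsthal, literally
def jacobA : Nat → Int
  | 0 => 0
  | 1 => 1
  | n + 2 => jacobA (n + 1) + 2 * jacobA n

-- A's while loop: while jacobsthal(j) < array_len - 1: append jacobsthal(j); j += 1
def loopA (limit : Int) : Nat → Nat → List Int
  | 0, _ => []
  | fuel + 1, j => if jacobA j < limit then jacobA j :: loopA limit fuel (j + 1) else []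

def build_jacob_insertion_sequence (array : List Int) : List Int :=
  loopA ((array.length : Int) - 1) array.length 3

-- ===== PORT B =====
-- B's loop: c = b + 2*a; if c >= limit: return; append c; a, b = b, c
def loopB (limit : Int) : Nat → Int → Int → List Int
  | 0, _, _ => []
  | fuel + 1, a, b =>
      let c := b + 2 * a
      if c ≥ limit then [] else c :: loopB limit fuel b c

def build_jacob_insertion_sequence_alt (array : List Int) : List Int :=
  loopB ((array.length : Int) - 1) array.length 1 1

-- ===== PRECONDITION & SPEC =====
def Spec_build_jacob_insertion_sequence (array : List Int) (out : List Int) : Prop := out = build_jacob_insertion_sequence_alt array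
instance (array : List Int) (out : List Int) : Decidable (Spec_build_jacob_insertion_sequence array out) := by unfold Spec_build_jacob_insertion_sequence; infer_instance

-- ===== CLAIM (what is proved, stated in full; the proofs are below) =====
def Claim_equal_build_jacob_insertion_sequence : Prop := ∀ (array : List Int), Dom_build_jacob_insertion_sequence array → Spec_build_jacob_insertion_sequence array (build_jacob_insertion_sequence array)

-- ===== LEMMAS AND PROOFS =====

-- Invariant: B's loop seeded with (jacobA j, jacobA (j+1)) walks A's loop from index j+2.
theorem loopB_eq_loopA (limit : Int) (fuel : Nat) :
    ∀ j : Nat, loopB limit fuel (jacobA j) (jacobA (j + 1)) = loopA limit fuel (j + 2) := by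
  induction fuel with
  | zero => intro j; rfl
  | succ fuel ih =>
      intro j
      have hc : jacobA (j + 1) + 2 * jacobA j = jacobA (j + 2) := rfl
      simp only [loopB, loopA, hc, ge_iff_le]
      by_cases h : jacobA (j + 2) < limit
      · simp only [if_neg (not_le.mpr h), if_pos h]
        exact congrArg _ (ih (j + 1))
      · simp [h, not_lt.mp h]

-- ===== VERDICT (by name: the statement is the Claim_ definition above) =====
theorem build_jacob_insertion_sequence_spec : Claim_equal_build_jacob_insertion_sequence := by
  intro array _
  unfold Spec_build_jacob_insertion_sequence
  unfold build_jacob_insertion_sequence build_jacob_insertion_sequence_alt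
  have h := loopB_eq_loopA ((array.length : Int) - 1) array.length 1
  simpa [jacobA] using h.symm
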